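-- pv_equiv track=rewrite | github.com/Chun-Bae/Baekjoon | Python/백준/Silver/17266. 어두운 굴다리/어두운 굴다리.py | find_min_height
-- ===== SOURCE A (Python) =====
-- def is_possible(height, n, lamps):
--     current_position = 0
--
--     for lamp in lamps:
--         if lamp - height > current_position:
--             return False
--         current_position = lamp + height
--         if current_position >= n:
--             return True
--
--     return current_position >= n
--
-- def find_min_height(n, m, lamps):
--     left, right = 1, n
--     result = n
--
--     while left <= right:
--         mid = (left + right) // 2
--
--         if is_possible(mid, n, lamps):
--             result = mid
--             right = mid - 1
--         else:
--             left = mid + 1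
--
--     return result
-- ===== SOURCE B (Python) =====
-- def find_min_height(n, m, lamps):
--     # One pass: minimal feasible height is the min over stopping lamps k of
--     # max(prefix requirement up to k, n - lamps[k]); clamp into [1, n].
--     if not lamps:
--         return n
--     req = lamps[0]
--     best = max(req, n - lamps[0])
--     prev = lamps[0]
--     for lamp in lamps[1:]:
--         req = max(req, -((lamp - prev) // -2))
--         best = min(best, max(req, n - lamp))
--         prev = lamp
--     return min(max(best, 1), n)
-- ===== Notes on version B (the rewrite author's own statement) =====
-- stated objective: alternative
-- what changed: Replaces the binary search over heights (each probe rescanning the lamps) with a single pass over the lamps that computes the minimal feasible height directly as the minimum over stopping lamps of max(prefix coverage requirement, distance to the tunnel end), clamped into [1, n]; intended as faster (O(m) vs O(m log n)) but measured only ~1.5x at the largest size.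
import Mathlib
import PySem

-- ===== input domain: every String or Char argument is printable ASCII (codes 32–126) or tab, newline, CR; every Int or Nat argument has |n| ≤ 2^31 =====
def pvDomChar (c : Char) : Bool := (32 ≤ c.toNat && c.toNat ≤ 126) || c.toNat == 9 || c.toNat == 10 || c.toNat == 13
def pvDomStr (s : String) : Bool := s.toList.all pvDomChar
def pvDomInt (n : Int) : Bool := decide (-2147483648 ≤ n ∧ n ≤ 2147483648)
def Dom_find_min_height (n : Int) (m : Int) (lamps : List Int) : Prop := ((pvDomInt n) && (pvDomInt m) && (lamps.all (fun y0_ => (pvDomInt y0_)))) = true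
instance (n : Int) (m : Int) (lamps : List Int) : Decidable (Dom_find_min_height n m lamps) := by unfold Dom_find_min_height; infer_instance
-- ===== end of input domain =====

-- B replaces A's binary search over heights by one direct pass over the lamps that
-- computes the minimal feasible height itself.

-- ===== PORT A =====
-- is_possible: loop over lamps carrying current_position
def isPossibleLoop (height n : Int) : Int → List Int → Bool
  | pos, [] => decide (pos ≥ n)
  | pos, lamp :: rest =>
      if lamp - height > pos then false
      else if lamp + height ≥ n then true
      else isPossibleLoop height n (lamp + height) rest

def is_possible (height n : Int) (lamps : List Int) : Bool :=
  isPossibleLoop height n 0 lamps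

-- the while loop of find_min_height; terminates since the interval shrinks
def bsLoop (n : Int) (lamps : List Int) (left right result : Int) : Int :=
  if h : left ≤ right then
    let mid := PySem.Int.floordiv (left + right) 2
    if is_possible mid n lamps then
      bsLoop n lamps left (mid - 1) mid
    else
      bsLoop n lamps (mid + 1) right result
  else result
termination_by (right - left + 1).toNat
decreasing_by
  · have := PySem.Int.floordiv_two_mid_bounds h
    omega
  · have := PySem.Int.floordiv_two_mid_bounds h
    omega

def find_min_height (n : Int) (m : Int) (lamps : List Int) : Int :=
  bsLoop n lamps 1 n n

-- ===== PORT B =====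
-- the for-loop of Source B, carrying (req, best, prev)
def bLoop (n : Int) : Int → Int → Int → List Int → Int
  | _, best, _, [] => best
  | req, best, prev, lamp :: rest =>
      let req' := max req (-(PySem.Int.floordiv (lamp - prev) (-2)))
      bLoop n req' (min best (max req' (n - lamp))) lamp rest

def find_min_height_alt (n : Int) (m : Int) (lamps : List Int) : Int :=
  match lamps with
  | [] => n
  | l0 :: rest => min (max (bLoop n l0 (max l0 (n - l0)) l0 rest) 1) n

-- ===== PRECONDITION & SPEC =====
def Spec_find_min_height (n : Int) (m : Int) (lamps : List Int) (out : Int) : Prop := out = find_min_height_alt n m lamps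
instance (n : Int) (m : Int) (lamps : List Int) (out : Int) : Decidable (Spec_find_min_height n m lamps out) := by unfold Spec_find_min_height; infer_instance

-- ===== CLAIM (what is proved, stated in full; the proofs are below) =====
def Claim_equal_find_min_height : Prop := ∀ (n : Int) (m : Int) (lamps : List Int), Dom_find_min_height n m lamps → Spec_find_min_height n m lamps (find_min_height n m lamps)

-- ===== LEMMAS AND PROOFS =====

-- ceiling division as in Source B: -(a // -2) is the least q with a ≤ 2*q
theorem ceil2_le_iff (a h : Int) : -(PySem.Int.floordiv a (-2)) ≤ h ↔ a ≤ 2 * h := by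
  have h0 := PySem.Int.floordiv_mul_add_mod a (-2)
  have h1 := PySem.Int.mod_neg_neg a (-2)
  norm_num at h1
  omega

-- Key invariant: B's loop value is ≤ h  iff  best ≤ h, or req ≤ h and A's tail loop succeeds
theorem bLoop_char (n : Int) (rest : List Int) :
    ∀ (prev req best h : Int), best ≤ max req (n - prev) →
    (bLoop n req best prev rest ≤ h ↔
      (best ≤ h ∨ (req ≤ h ∧ isPossibleLoop h n (prev + h) rest = true))) := by
  induction rest with
  | nil =>
      intro prev req best h hinv
      simp only [bLoop, isPossibleLoop, decide_eq_true_eq]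
      constructor
      · intro hb; exact Or.inl hb
      · rintro (hb | ⟨hr, hp⟩)
        · exact hb
        · have : max req (n - prev) ≤ h := by omega
          omega
  | cons lamp rest' ih =>
      intro prev req best h hinv
      simp only [bLoop, isPossibleLoop]
      set c := -(PySem.Int.floordiv (lamp - prev) (-2)) with hc
      have hcle : c ≤ h ↔ lamp - prev ≤ 2 * h := ceil2_le_iff (lamp - prev) h
      have hmax1 : max req c ≤ h ↔ (req ≤ h ∧ c ≤ h) := max_le_iff
      have hmax2 : max (max req c) (n - lamp) ≤ h ↔ (max req c ≤ h ∧ n - lamp ≤ h) := max_le_iff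
      have hinv' : min best (max (max req c) (n - lamp)) ≤ max (max req c) (n - lamp) :=
        min_le_right _ _
      rw [ih lamp (max req c) (min best (max (max req c) (n - lamp))) h hinv']
      have hmin : min best (max (max req c) (n - lamp)) ≤ h ↔
          (best ≤ h ∨ max (max req c) (n - lamp) ≤ h) := min_le_iff
      by_cases h1 : lamp - h > prev + h
      · rw [if_pos h1]
        simp only [Bool.false_eq_true, and_false, or_false]
        constructor
        · rintro (hb | ⟨hr, _⟩)
          · omega
          · exfalso; omega
        · intro hb; left; omega
      · rw [if_neg h1]
        by_cases h2 : lamp + h ≥ n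
        · rw [if_pos h2]
          constructor
          · rintro (hb | ⟨hr, _⟩)
            · by_cases hbh : best ≤ h
              · left; exact hbh
              · right; exact ⟨by omega, rfl⟩
            · right; exact ⟨by omega, rfl⟩
          · rintro (hb | ⟨hr, _⟩)
            · left; omega
            · left; omega
        · rw [if_neg h2]
          constructor
          · rintro (hb | ⟨hr, hp⟩)
            · by_cases hbh : best ≤ h
              · left; exact hbh
              · exfalso; omega
            · right; exact ⟨by omega, hp⟩
          · rintro (hb | ⟨hr, hp⟩)
            · left; omega
            · right; exact ⟨by omega, hp⟩

-- is_possible on a nonempty lamp list is exactly 'h is at least B's computed height'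
theorem is_possible_iff (n l0 : Int) (rest : List Int) :
    ∀ h : Int, is_possible h n (l0 :: rest) = true ↔ bLoop n l0 (max l0 (n - l0)) l0 rest ≤ h := by
  intro h
  simp only [is_possible, isPossibleLoop]
  rw [bLoop_char n rest l0 l0 (max l0 (n - l0)) h (le_refl _)]
  have hmax : max l0 (n - l0) ≤ h ↔ (l0 ≤ h ∧ n - l0 ≤ h) := max_le_iff
  by_cases h1 : l0 - h > 0
  · rw [if_pos h1]
    constructor
    · intro hf; exact absurd hf (by simp)
    · rintro (hb | ⟨hr, _⟩) <;> omega
  · rw [if_neg h1]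
    by_cases h2 : l0 + h ≥ n
    · rw [if_pos h2]
      constructor
      · intro _; left; omega
      · intro _; rfl
    · rw [if_neg h2]
      constructor
      · intro hp
        right
        exact ⟨by omega, hp⟩
      · rintro (hb | ⟨hr, hp⟩)
        · omega
        · exact hp

-- binary search over a threshold predicate
theorem bsLoop_char (n : Int) (lamps : List Int) (hB : Int)
    (hchar : ∀ h : Int, is_possible h n lamps = true ↔ hB ≤ h) :
    ∀ (l r res : Int), bsLoop n lamps l r res =
      if l ≤ r ∧ hB ≤ r then max hB l else res := by
  intro l r res
  induction l, r, res using bsLoop.induct n lamps with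
  | case1 l r res hlr mid hposs ih =>
      have hmideq : mid = PySem.Int.floordiv (l + r) 2 := rfl
      have hmid : l ≤ mid ∧ mid ≤ r := hmideq ▸ PySem.Int.floordiv_two_mid_bounds hlr
      have hBmid : hB ≤ mid := (hchar mid).mp hposs
      rw [bsLoop, dif_pos hlr, ← hmideq]
      clear_value mid
      rw [if_pos hposs, ih]
      rw [if_pos (show l ≤ r ∧ hB ≤ r by omega)]
      rcases max_cases hB l with ⟨he, _⟩ | ⟨he, _⟩ <;>
        · split_ifs with hc
          · rfl
          · omega
  | case2 l r res hlr mid hposs ih =>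
      have hmideq : mid = PySem.Int.floordiv (l + r) 2 := rfl
      have hmid : l ≤ mid ∧ mid ≤ r := hmideq ▸ PySem.Int.floordiv_two_mid_bounds hlr
      have hBmid : ¬ hB ≤ mid := fun hh => hposs ((hchar mid).mpr hh)
      rw [bsLoop, dif_pos hlr, ← hmideq]
      clear_value mid
      rw [if_neg hposs, ih]
      by_cases hr : hB ≤ r
      · rw [if_pos (show mid + 1 ≤ r ∧ hB ≤ r by omega),
            if_pos (show l ≤ r ∧ hB ≤ r by omega)]
        rcases max_cases hB (mid + 1) with ⟨he, _⟩ | ⟨he, _⟩ <;>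
          rcases max_cases hB l with ⟨he2, _⟩ | ⟨he2, _⟩ <;> omega
      · rw [if_neg (show ¬ (mid + 1 ≤ r ∧ hB ≤ r) by omega),
            if_neg (show ¬ (l ≤ r ∧ hB ≤ r) by omega)]
  | case3 l r res hlr =>
      rw [bsLoop, dif_neg hlr]
      rw [if_neg (fun hh => hlr hh.1)]

-- when no height is feasible, the search returns its initial result
theorem bsLoop_const (n : Int) (lamps : List Int)
    (hfalse : ∀ h : Int, is_possible h n lamps = false) :
    ∀ (l r res : Int), bsLoop n lamps l r res = res := by
  intro l r res
  induction l, r, res using bsLoop.induct n lamps with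
  | case1 l r res hlr mid hposs ih =>
      rw [hfalse] at hposs; simp at hposs
  | case2 l r res hlr mid hposs ih =>
      have hmideq : mid = PySem.Int.floordiv (l + r) 2 := rfl
      rw [bsLoop, dif_pos hlr, ← hmideq]
      rw [if_neg hposs]
      exact ih
  | case3 l r res hlr =>
      rw [bsLoop, dif_neg hlr]

-- ===== VERDICT (by name: the statement is the Claim_ definition above) =====
theorem find_min_height_spec : Claim_equal_find_min_height := by
  intro n m lamps _
  unfold Spec_find_min_height find_min_height
  cases lamps with
  | nil =>
      show bsLoop n [] 1 n n = find_min_height_alt n m []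
      by_cases hn : 1 ≤ n
      · rw [bsLoop_const n [] (fun h => by
          simp only [is_possible, isPossibleLoop, decide_eq_false_iff_not]
          omega)]
        rfl
      · rw [bsLoop, dif_neg (by omega : ¬ (1 : Int) ≤ n)]
        rfl
  | cons l0 rest =>
      show bsLoop n (l0 :: rest) 1 n n = find_min_height_alt n m (l0 :: rest)
      have halt : find_min_height_alt n m (l0 :: rest) =
          min (max (bLoop n l0 (max l0 (n - l0)) l0 rest) 1) n := rfl
      rw [halt, bsLoop_char n (l0 :: rest) (bLoop n l0 (max l0 (n - l0)) l0 rest)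
            (is_possible_iff n l0 rest)]
      set hB := bLoop n l0 (max l0 (n - l0)) l0 rest with hhB
      rcases max_cases hB (1 : Int) with ⟨he, _⟩ | ⟨he, _⟩ <;>
        rcases min_cases (max hB 1) n with ⟨he2, _⟩ | ⟨he2, _⟩ <;>
        · split_ifs with hc
          · omega
          · omega
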